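-- pv_equiv track=rewrite | github.com/NSLS2/hrd_tools | src/hrd_tools/sim_report.py | aggregate_min_max
-- ===== SOURCE A (Python) =====
-- from typing import Any, Literal
--
-- def aggregate_min_max(
--     data: list[dict[str, dict[str, Any]]],
-- ) -> dict[str, tuple[Any, Any]]:
--     """
--     Aggregate a list of nested dictionaries into a single dictionary.
--
--     Each key in the output is formed by concatenating the outer and inner keys with a dot.
--     The corresponding value is a tuple (min, max) representing the minimum and maximum values
--     found for that inner key across all dictionaries.
--
--     Parameters
--     ----------
--     data : list of dict[str, dict[str, Any]]
--         A list of dictionaries where each dictionary maps an outer key (str) to an inner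
--         dictionary (dict[str, Any]). The inner dictionary's values should be comparable
--         (e.g., numbers).
--
--     Returns
--     -------
--     dict[str, tuple[Any, Any]]
--         A dictionary with keys in the format "outer.inner" and values as tuples (min, max)
--         computed from the aggregated inner dictionary values.
--
--     Examples
--     --------
--     >>> data = [
--     ...     {"A": {"x": 10, "y": 20}},
--     ...     {"A": {"x": 15, "y": 25}},
--     ...     {"B": {"z": 5}},
--     ...     {"B": {"z": 7, "w": 3}}
--     ... ]
--     >>> aggregate_min_max(data)
--     {'A.x': (10, 15), 'A.y': (20, 25), 'B.z': (5, 7), 'B.w': (3, 3)}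
--     """
--     result: dict[str, tuple[Any, Any]] = {}
--
--     for outer_dict in data:
--         for outer_key, inner_dict in outer_dict.items():
--             for inner_key, value in inner_dict.items():
--                 composite_key = f"{outer_key}.{inner_key}"
--                 if composite_key not in result:
--                     result[composite_key] = (value, value)
--                 else:
--                     current_min, current_max = result[composite_key]
--                     result[composite_key] = (
--                         min(current_min, value),
--                         max(current_max, value),
--                     )
--
--     return result
-- ===== SOURCE B (Python) =====
-- def aggregate_min_max(data):
--     pairs = [
--         (f"{outer_key}.{inner_key}", value)
--         for outer_dict in data
--         for outer_key, inner_dict in outer_dict.items()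
--         for inner_key, value in inner_dict.items()
--     ]
--     groups = {}
--     for key, value in pairs:
--         groups.setdefault(key, []).append(value)
--     return {key: (min(values), max(values)) for key, values in groups.items()}
-- ===== Notes on version B (the rewrite author's own statement) =====
-- stated objective: simpler
-- what changed: Replaces A's incremental running-(min,max) dict update inside the triple nested loop by a flatten-to-(composite-key,value) comprehension, grouping all values per key, and a final single min()/max() reduction per group.
import Mathlib
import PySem

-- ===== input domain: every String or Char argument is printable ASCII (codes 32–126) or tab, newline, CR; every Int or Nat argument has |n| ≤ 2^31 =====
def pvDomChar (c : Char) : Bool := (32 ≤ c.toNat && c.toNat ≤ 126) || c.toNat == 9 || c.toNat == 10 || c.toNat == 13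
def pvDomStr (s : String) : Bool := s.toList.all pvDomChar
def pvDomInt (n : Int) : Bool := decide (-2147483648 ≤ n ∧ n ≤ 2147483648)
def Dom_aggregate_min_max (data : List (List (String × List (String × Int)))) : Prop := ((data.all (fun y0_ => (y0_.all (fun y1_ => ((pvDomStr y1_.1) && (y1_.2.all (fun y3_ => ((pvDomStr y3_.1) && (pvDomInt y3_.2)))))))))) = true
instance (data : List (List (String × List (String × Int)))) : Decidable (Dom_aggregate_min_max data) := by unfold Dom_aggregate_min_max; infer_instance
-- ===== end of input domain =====

-- B replaces A's incremental running-min/max dict update by flatten-to-pairs, group values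
-- per composite key, then one min/max reduction per group (objective: simpler decomposition).

-- ===== PORT A =====
-- the body of A's innermost loop: either create (value, value) or update the running (min, max)
def aggAStep (r : PySem.Dict String (Int × Int)) (k : String) (v : Int) :
    PySem.Dict String (Int × Int) :=
  if r.contains k = false then
    r.insert k (v, v)
  else
    -- key present, so get? is some; the getD default is never used
    let cur := (r.get? k).getD (v, v)
    r.insert k (min cur.1 v, max cur.2 v)

def aggregate_min_max (data : List (List (String × List (String × Int)))) :
    List (String × Int × Int) :=
  (data.foldl
    (fun r od => od.foldl
      (fun r oi => oi.2.foldl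
        (fun r iv => aggAStep r (oi.1 ++ "." ++ iv.1) iv.2) r) r)
    PySem.Dict.empty).items

-- ===== PORT B =====
-- the flattening comprehension: [(f"{ok}.{ik}", v) for od in data for ok, idc in od for ik, v in idc]
def pvPairs (data : List (List (String × List (String × Int)))) : List (String × Int) :=
  data.flatMap (fun od => od.flatMap (fun oi => oi.2.map (fun iv => (oi.1 ++ "." ++ iv.1, iv.2))))

def aggregate_min_max_alt (data : List (List (String × List (String × Int)))) :
    List (String × Int × Int) :=
  let groups := (pvPairs data).foldl
    (fun g p => g.modify p.1 [] (fun vs => vs ++ [p.2])) PySem.Dict.empty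
  -- each group list is nonempty by construction, so min()/max() never raise; .getD 0 is never used
  groups.items.map (fun p =>
    (p.1, ((PySem.List.min? p.2 (fun y => y)).getD 0, (PySem.List.max? p.2 (fun y => y)).getD 0)))

-- ===== PRECONDITION & SPEC =====
def Spec_aggregate_min_max (data : List (List (String × List (String × Int)))) (out : List (String × Int × Int)) : Prop := out = aggregate_min_max_alt data
instance (data : List (List (String × List (String × Int)))) (out : List (String × Int × Int)) : Decidable (Spec_aggregate_min_max data out) := by unfold Spec_aggregate_min_max; infer_instance

-- ===== CLAIM (what is proved, stated in full; the proofs are below) =====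
def Claim_equal_aggregate_min_max : Prop := ∀ (data : List (List (String × List (String × Int)))), Dom_aggregate_min_max data → Spec_aggregate_min_max data (aggregate_min_max data)

-- ===== LEMMAS AND PROOFS =====

-- the value A's step inserts (A's step is always an insert at key k)
def aggAVal (r : PySem.Dict String (Int × Int)) (k : String) (v : Int) : Int × Int :=
  if r.contains k = false then (v, v)
  else
    let cur := (r.get? k).getD (v, v)
    (min cur.1 v, max cur.2 v)

theorem aggAStep_eq_insert (r : PySem.Dict String (Int × Int)) (k : String) (v : Int) :
    aggAStep r k v = r.insert k (aggAVal r k v) := by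
  unfold aggAStep aggAVal; split <;> rfl

-- A's nested loops are the single fold of its step over the flattened pair list
theorem aggA_flatten (data : List (List (String × List (String × Int)))) :
    (data.foldl
      (fun r od => od.foldl
        (fun r oi => oi.2.foldl
          (fun r iv => aggAStep r (oi.1 ++ "." ++ iv.1) iv.2) r) r)
      PySem.Dict.empty)
    = (pvPairs data).foldl (fun r p => aggAStep r p.1 p.2) PySem.Dict.empty := by
  simp [pvPairs, List.foldl_flatMap, List.foldl_map]

-- one step of the running (min, max) on an optional accumulator
def mmF (o : Option (Int × Int)) (v : Int) : Option (Int × Int) :=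
  match o with
  | none => some (v, v)
  | some (a, b) => some (min a v, max b v)

theorem aggA_get (ps : List (String × Int)) (d : PySem.Dict String (Int × Int)) (c : String) :
    (ps.foldl (fun r p => aggAStep r p.1 p.2) d).get? c
      = ((ps.filter (fun p => p.1 == c)).map (fun p => p.2)).foldl mmF (d.get? c) := by
  induction ps generalizing d with
  | nil => rfl
  | cons p t ih =>
    obtain ⟨k, v⟩ := p
    rw [List.foldl_cons, ih, List.filter_cons]
    by_cases hkc : k = c
    · subst hkc
      have hval : (aggAStep d k v).get? k = mmF (d.get? k) v := by
        rw [aggAStep_eq_insert, PySem.Dict.get?_insert_self]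
        unfold aggAVal mmF
        by_cases hc : d.contains k = false
        · have hn : d.get? k = none := by
            rw [PySem.Dict.contains_eq_isSome_get?] at hc
            exact Option.not_isSome_iff_eq_none.mp (by simp [hc])
          simp [hc, hn]
        · have hsome : (d.get? k).isSome := by
            rw [PySem.Dict.contains_eq_isSome_get?] at hc
            exact Option.isSome_iff_ne_none.mpr (by simpa using hc)
          obtain ⟨⟨a, b⟩, hab⟩ := Option.isSome_iff_exists.mp hsome
          simp [hc, hab]
      simp [hval]
    · have hget : (aggAStep d k v).get? c = d.get? c := by
        rw [aggAStep_eq_insert, PySem.Dict.get?_insert,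
          if_neg (fun h => hkc h.symm)]
      have hfk : ((k, v).1 == c) = false := by simpa using hkc
      simp [hfk, hget]

theorem foldl_mmF_some (vs : List Int) (a b : Int) :
    vs.foldl mmF (some (a, b)) = some (vs.foldl min a, vs.foldl max b) := by
  induction vs generalizing a b with
  | nil => rfl
  | cons h t ih => simp [mmF, ih]

theorem aggregate_min_max_spec' (data : List (List (String × List (String × Int)))) :
    aggregate_min_max data = aggregate_min_max_alt data := by
  have halt : aggregate_min_max_alt data
      = ((pvPairs data).foldl (fun g p => g.modify p.1 [] (fun vs => vs ++ [p.2]))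
          PySem.Dict.empty).items.map (fun p =>
        (p.1, ((PySem.List.min? p.2 (fun y => y)).getD 0,
               (PySem.List.max? p.2 (fun y => y)).getD 0))) := rfl
  unfold aggregate_min_max
  rw [aggA_flatten, halt]
  have hfun : (fun (r : PySem.Dict String (Int × Int)) (p : String × Int) => aggAStep r p.1 p.2)
      = fun r p => r.insert p.1 (aggAVal r p.1 p.2) := by
    funext r p; exact aggAStep_eq_insert r p.1 p.2
  set ps := pvPairs data with hps
  set dA := ps.foldl (fun r p => aggAStep r p.1 p.2) PySem.Dict.empty with hdA
  set dB := ps.foldl (fun g p => g.modify p.1 [] (fun vs => vs ++ [p.2])) PySem.Dict.empty with hdB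
  have hkA : dA.keys = PySem.Set.update ([] : List String) (ps.map (fun p => p.1)) := by
    rw [hdA, hfun]
    simpa using
      PySem.Dict.keys_foldl_insert_key ps (fun p => p.1) (fun d p => aggAVal d p.1 p.2) _
  have hkB : dB.keys = PySem.Set.update ([] : List String) (ps.map (fun p => p.1)) := by
    rw [hdB]
    simpa using
      PySem.Dict.keys_foldl_modify_key ps (fun p => p.1) [] (fun _ p vs => vs ++ [p.2]) _
  have hndA : dA.keys.Nodup := by
    rw [hdA, hfun]
    exact PySem.Dict.nodup_keys_foldl_insert_key ps (fun p => p.1) _ _ PySem.Dict.nodup_keys_empty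
  have hndB : dB.keys.Nodup := by
    rw [hdB]
    exact PySem.Dict.nodup_keys_foldl_modify_key ps (fun p => p.1) [] _ _ PySem.Dict.nodup_keys_empty
  rw [PySem.Dict.items_eq_map_keys dA hndA (0, 0), PySem.Dict.items_eq_map_keys dB hndB [],
    List.map_map, hkA, hkB]
  apply List.map_congr_left
  intro k hk
  have hkmem : k ∈ ps.map (fun p => p.1) := by
    rw [PySem.Set.update_nil_left] at hk
    exact (PySem.List.mem_dedup _ _).mp hk
  have hBget : dB.getD k [] = (ps.filter (fun p => p.1 == k)).map (fun p => p.2) := by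
    rw [hdB]
    simpa using PySem.Dict.getD_foldl_modify_append ps PySem.Dict.empty k
  have hAget : dA.get? k = ((ps.filter (fun p => p.1 == k)).map (fun p => p.2)).foldl mmF none := by
    rw [hdA, aggA_get]; rfl
  have hne : (ps.filter (fun p => p.1 == k)).map (fun p => p.2) ≠ [] := by
    obtain ⟨p, hp, hpk⟩ := List.mem_map.mp hkmem
    have : p ∈ ps.filter (fun q => q.1 == k) := by
      rw [List.mem_filter]; exact ⟨hp, by simp [hpk]⟩
    simp only [ne_eq, List.map_eq_nil_iff]
    exact List.ne_nil_of_mem this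
  obtain ⟨h, t, hvs⟩ := List.exists_cons_of_ne_nil hne
  simp only [Function.comp]
  rw [PySem.Dict.getD_eq_get?_getD, hAget, hBget, hvs]
  simp [mmF, foldl_mmF_some, PySem.List.min?_id_cons, PySem.List.max?_id_cons]

-- ===== VERDICT (by name: the statement is the Claim_ definition above) =====
theorem aggregate_min_max_spec : Claim_equal_aggregate_min_max := by
  intro data _
  unfold Spec_aggregate_min_max
  exact aggregate_min_max_spec' data
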